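-- pv_equiv track=rewrite | github.com/pypi-data/pypi-mirror-374 | packages/lightning-parser-lib/lightning_parser_lib-0.3.42.tar.gz/lightning_parser_lib-0.3.42/lightning_parser_lib/number_crunchers/lightning_stitcher.py | filter_correlations_by_chain_size
-- ===== SOURCE A (Python) =====
-- def filter_correlations_by_chain_size(correlations, min_pts, filter_point_to_self: bool = True):
--     """
--     Filter out correlations that do not belong to a connected chain with at least min_pts nodes.
--
--     This function builds an undirected graph where each correlation (parent, child)
--     represents an edge. It then uses depth-first search (DFS) to identify connected
--     components. Only nodes within components that have at least min_pts nodes are considered valid.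
--
--     Parameters:
--       correlations: List of tuples (parent, child) representing connections between events.
--       min_pts: Minimum number of nodes required for a chain to be considered valid.
--
--     Returns:
--       A list of filtered correlations where both nodes belong to a valid chain.
--     """
--
--     # Build an undirected graph from the correlations.
--     graph = {}
--     for parent, child in correlations:
--         graph.setdefault(parent, set()).add(child)
--         graph.setdefault(child, set()).add(parent)
--
--     visited = set()
--     valid_nodes = set()
--
--     # Use DFS to find connected components.
--     for node in graph:
--         if node not in visited:
--             stack = [node]
--             component = set()
--             while stack:
--                 current = stack.pop()
--                 if current not in component:
--                     component.add(current)
--                     stack.extend(graph.get(current, []))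
--             visited |= component
--             if len(component) >= min_pts:
--                 valid_nodes |= component
--
--     # Filter correlations: both parent and child must be in a valid chain.
--     return [(p, c) for (p, c) in correlations if p in valid_nodes and c in valid_nodes and (filter_point_to_self and p != c)]
-- ===== SOURCE B (Python) =====
-- def filter_correlations_by_chain_size(correlations, min_pts, filter_point_to_self: bool = True):
--     """Same result as A, but by merging component lists in one pass over the
--     edges instead of building an adjacency graph and running DFS."""
--     comps = []  # disjoint lists; partition of the seen nodes into connected components
--     for p, c in correlations:
--         ip = None
--         ic = None
--         for i, comp in enumerate(comps):
--             if p in comp: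
--                 ip = i
--             if c in comp:
--                 ic = i
--         if ip is None and ic is None:
--             comps.append([p] if p == c else [p, c])
--         elif ip is None:
--             comps[ic].append(p)
--         elif ic is None:
--             comps[ip].append(c)
--         elif ip != ic:
--             lo, hi = min(ip, ic), max(ip, ic)
--             comps[lo].extend(comps[hi])
--             del comps[hi]
--     valid = set()
--     for comp in comps:
--         if len(comp) >= min_pts:
--             valid.update(comp)
--     return [(p, c) for (p, c) in correlations
--             if p in valid and c in valid and (filter_point_to_self and p != c)]
-- ===== Notes on version B (the rewrite author's own statement) =====
-- stated objective: alternative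
-- what changed: Replaces A's adjacency-dict + explicit-stack DFS component search with a single pass over the edges that merges component lists directly (create/extend/merge on each edge), then keeps edges whose endpoints lie in a component of size >= min_pts.
import Mathlib
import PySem

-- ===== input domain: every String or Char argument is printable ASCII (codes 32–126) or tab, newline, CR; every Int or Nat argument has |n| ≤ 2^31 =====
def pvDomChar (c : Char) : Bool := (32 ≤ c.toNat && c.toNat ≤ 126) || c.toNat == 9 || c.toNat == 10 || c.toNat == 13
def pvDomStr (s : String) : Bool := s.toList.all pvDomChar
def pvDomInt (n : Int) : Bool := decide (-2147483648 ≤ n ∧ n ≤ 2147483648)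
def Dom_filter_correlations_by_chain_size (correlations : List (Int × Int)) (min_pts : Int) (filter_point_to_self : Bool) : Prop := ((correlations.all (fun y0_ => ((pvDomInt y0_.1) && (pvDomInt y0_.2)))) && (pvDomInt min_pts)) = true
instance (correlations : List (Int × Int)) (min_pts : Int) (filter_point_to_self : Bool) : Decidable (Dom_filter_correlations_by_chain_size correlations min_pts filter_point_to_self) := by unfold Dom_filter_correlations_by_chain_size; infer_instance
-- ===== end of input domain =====

-- B replaces A's adjacency graph + DFS by a single pass that merges component lists edge by edge (alternative algorithm, same result).

-- ===== PORT A =====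
-- graph.setdefault(a, set()).add(b)  ==  graph[a] = graph.get(a, set()) with b added (key position preserved) == Dict.modify
def pvGraph (correlations : List (Int × Int)) : PySem.Dict Int (PySem.Set Int) :=
  correlations.foldl
    (fun g pc =>
      (g.modify pc.1 PySem.Set.empty (fun s => PySem.Set.add s pc.2)).modify
        pc.2 PySem.Set.empty (fun s => PySem.Set.add s pc.1))
    PySem.Dict.empty

-- termination helper for the DFS while-loop (cited by decreasing_by)
theorem pv_filter_add_lt {l : List Int} {comp : PySem.Set Int} {x : Int} (hx : x ∈ l) (hc : ¬ x ∈ comp) :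
    (l.filter (fun k => !decide (k ∈ PySem.Set.add comp x))).length <
      (l.filter (fun k => !decide (k ∈ comp))).length := by
  have hsub : List.Sublist (l.filter (fun k => !decide (k ∈ PySem.Set.add comp x)))
      (l.filter (fun k => !decide (k ∈ comp))) := by
    apply List.monotone_filter_right
    intro a ha
    simp only [Bool.not_eq_eq_eq_not, Bool.not_true, decide_eq_false_iff_not,
      PySem.Set.mem_add] at ha ⊢
    exact fun h => ha (Or.inl h)
  refine Nat.lt_of_le_of_ne hsub.length_le (fun he => ?_)
  have heq := hsub.eq_of_length he
  have hxbig : x ∈ l.filter (fun k => !decide (k ∈ comp)) := by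
    simp [List.mem_filter, hx, hc]
  rw [← heq] at hxbig
  simp [List.mem_filter, PySem.Set.mem_add] at hxbig

-- the DFS while-loop of A: pop, skip if already in component, else add and push the neighbours
def pvDfs (g : PySem.Dict Int (PySem.Set Int)) (stack : List Int) (component : PySem.Set Int) :
    PySem.Set Int :=
  match stack with
  | [] => component
  | current :: rest =>
      if current ∈ component then pvDfs g rest component
      else pvDfs g ((g.getD current PySem.Set.empty) ++ rest) (PySem.Set.add component current)
termination_by ((g.keys.filter (fun k => !decide (k ∈ component))).length, stack.length)
decreasing_by
  · exact Prod.Lex.right _ (Nat.lt_succ_self _)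
  · by_cases hk : current ∈ g.keys
    · exact Prod.Lex.left _ _ (pv_filter_add_lt hk (by assumption))
    · have hempty : g.getD current PySem.Set.empty = [] :=
        PySem.Dict.getD_of_not_contains g _ (by
          rw [← Bool.not_eq_true]
          exact fun hcon => hk ((PySem.Dict.contains_iff_mem_keys g current).mp hcon))
      have hfeq : (g.keys.filter (fun k => !decide (k ∈ PySem.Set.add component current))).length =
          (g.keys.filter (fun k => !decide (k ∈ component))).length := by
        congr 1
        apply List.filter_congr
        intro a ha
        have : a ≠ current := fun h => hk (h ▸ ha)
        simp [PySem.Set.mem_add, this]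
      rw [hfeq, hempty]
      exact Prod.Lex.right _ (Nat.lt_succ_self _)

-- the outer for-loop of A over the graph's keys, maintaining visited and valid_nodes
def pvChain (g : PySem.Dict Int (PySem.Set Int)) (min_pts : Int) :
    List Int → PySem.Set Int → PySem.Set Int → PySem.Set Int
  | [], _, valid => valid
  | node :: rest, visited, valid =>
      if node ∈ visited then pvChain g min_pts rest visited valid
      else
        let component := pvDfs g [node] PySem.Set.empty
        let visited' := visited.union component
        let valid' := if min_pts ≤ PySem.Set.len component then valid.union component else valid
        pvChain g min_pts rest visited' valid'

def filter_correlations_by_chain_size (correlations : List (Int × Int)) (min_pts : Int)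
    (filter_point_to_self : Bool) : List (Int × Int) :=
  let g := pvGraph correlations
  let valid := pvChain g min_pts g.keys PySem.Set.empty PySem.Set.empty
  correlations.filter (fun pc =>
    decide (pc.1 ∈ valid) && decide (pc.2 ∈ valid) && (filter_point_to_self && decide (pc.1 ≠ pc.2)))

-- ===== PORT B =====
-- one scan over enumerate(comps) recording the last component index containing p resp. c
def pvFindPC (comps : List (List Int)) (p c : Int) : Option Nat × Option Nat :=
  comps.zipIdx.foldl
    (fun acc ci =>
      ((if p ∈ ci.1 then some ci.2 else acc.1), (if c ∈ ci.1 then some ci.2 else acc.2)))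
    (none, none)

-- process one edge: create / extend / merge component lists
def pvMerge (comps : List (List Int)) (pc : Int × Int) : List (List Int) :=
  match pvFindPC comps pc.1 pc.2 with
  | (none, none) => comps ++ [if pc.1 = pc.2 then [pc.1] else [pc.1, pc.2]]
  | (none, some j) => comps.modify j (fun comp => comp ++ [pc.1])
  | (some i, none) => comps.modify i (fun comp => comp ++ [pc.2])
  | (some i, some j) =>
      if i = j then comps
      else
        (comps.modify (min i j) (fun comp => comp ++ comps.getD (max i j) [])).eraseIdx (max i j)

def filter_correlations_by_chain_size_alt (correlations : List (Int × Int)) (min_pts : Int)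
    (filter_point_to_self : Bool) : List (Int × Int) :=
  let comps := correlations.foldl pvMerge []
  let valid := comps.foldl
    (fun v comp => if min_pts ≤ (comp.length : Int) then PySem.Set.update v comp else v)
    PySem.Set.empty
  correlations.filter (fun pc =>
    decide (pc.1 ∈ valid) && decide (pc.2 ∈ valid) && (filter_point_to_self && decide (pc.1 ≠ pc.2)))

-- ===== PRECONDITION & SPEC =====
def Spec_filter_correlations_by_chain_size (correlations : List (Int × Int)) (min_pts : Int) (filter_point_to_self : Bool) (out : List (Int × Int)) : Prop := out = filter_correlations_by_chain_size_alt correlations min_pts filter_point_to_self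
instance (correlations : List (Int × Int)) (min_pts : Int) (filter_point_to_self : Bool) (out : List (Int × Int)) : Decidable (Spec_filter_correlations_by_chain_size correlations min_pts filter_point_to_self out) := by unfold Spec_filter_correlations_by_chain_size; infer_instance

-- ===== CLAIM (what is proved, stated in full; the proofs are below) =====
def Claim_equal_filter_correlations_by_chain_size : Prop := ∀ (correlations : List (Int × Int)) (min_pts : Int) (filter_point_to_self : Bool), Dom_filter_correlations_by_chain_size correlations min_pts filter_point_to_self → Spec_filter_correlations_by_chain_size correlations min_pts filter_point_to_self (filter_correlations_by_chain_size correlations min_pts filter_point_to_self)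

-- ===== LEMMAS AND PROOFS =====

-- The common specification: the symmetric edge relation, its reflexive-transitive closure,
-- the nodes of the graph, and "y lies in a component of at least min_pts nodes".
def pvAdjE (E : List (Int × Int)) (a b : Int) : Prop := (a, b) ∈ E ∨ (b, a) ∈ E

def pvConn (E : List (Int × Int)) : Int → Int → Prop := Relation.ReflTransGen (pvAdjE E)

def pvNode (E : List (Int × Int)) (x : Int) : Prop := ∃ pc ∈ E, x = pc.1 ∨ x = pc.2

def pvSizeOK (E : List (Int × Int)) (min_pts : Int) (y : Int) : Prop :=
  ∃ L : List Int, L.Nodup ∧ (∀ z, z ∈ L ↔ pvConn E y z) ∧ min_pts ≤ (L.length : Int)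

theorem pvAdjE_symm {E : List (Int × Int)} {a b : Int} (h : pvAdjE E a b) : pvAdjE E b a :=
  h.elim Or.inr Or.inl

theorem pvConn_symm {E : List (Int × Int)} {x y : Int} (h : pvConn E x y) : pvConn E y x :=
  Relation.ReflTransGen.symmetric (fun _ _ => pvAdjE_symm) h

theorem pvNode_of_adj_right {E : List (Int × Int)} {a b : Int} (h : pvAdjE E a b) : pvNode E b := by
  rcases h with h | h
  · exact ⟨(a, b), h, Or.inr rfl⟩
  · exact ⟨(b, a), h, Or.inl rfl⟩

theorem pvConn_node_or_eq {E : List (Int × Int)} {x y : Int} (h : pvConn E x y) :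
    y = x ∨ pvNode E y := by
  rcases h.cases_tail with h | ⟨c, _, hc⟩
  · exact Or.inl h
  · exact Or.inr (pvNode_of_adj_right hc)

theorem pvConn_eq_of_not_node {E : List (Int × Int)} {x y : Int} (hx : ¬ pvNode E x)
    (h : pvConn E x y) : y = x := by
  rcases h.cases_head with h | ⟨c, hc, _⟩
  · exact h.symm
  · exact absurd (pvNode_of_adj_right (pvAdjE_symm hc)) hx

theorem pv_rtg_congr {r s : Int → Int → Prop} (h : ∀ a b, r a b ↔ s a b) (x y : Int) :
    Relation.ReflTransGen r x y ↔ Relation.ReflTransGen s x y :=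
  ⟨Relation.ReflTransGen.mono (fun a b hr => (h a b).mp hr),
   Relation.ReflTransGen.mono (fun a b hr => (h a b).mpr hr)⟩

-- uniqueness of the length in pvSizeOK
theorem pv_length_eq_of_same_mem {L₁ L₂ : List Int} (h₁ : L₁.Nodup) (h₂ : L₂.Nodup)
    (h : ∀ z, z ∈ L₁ ↔ z ∈ L₂) : L₁.length = L₂.length :=
  ((List.perm_ext_iff_of_nodup h₁ h₂).mpr h).length_eq

-- ----- A side: the graph -----

theorem pvNode_append (E : List (Int × Int)) (p c y : Int) :
    pvNode (E ++ [(p, c)]) y ↔ pvNode E y ∨ y = p ∨ y = c := by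
  constructor
  · rintro ⟨pc, hpc, h⟩
    rcases List.mem_append.mp hpc with h' | h'
    · exact Or.inl ⟨pc, h', h⟩
    · simp only [List.mem_singleton] at h'
      subst h'
      rcases h with h | h
      · exact Or.inr (Or.inl h)
      · exact Or.inr (Or.inr h)
  · rintro (⟨pc, hpc, h⟩ | rfl | rfl)
    · exact ⟨pc, List.mem_append_left _ hpc, h⟩
    · exact ⟨(y, c), List.mem_append_right _ (by simp), Or.inl rfl⟩
    · exact ⟨(p, y), List.mem_append_right _ (by simp), Or.inr rfl⟩

theorem pvAdjE_append (E : List (Int × Int)) (p c a b : Int) :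
    pvAdjE (E ++ [(p, c)]) a b ↔ pvAdjE E a b ∨ (a = p ∧ b = c) ∨ (a = c ∧ b = p) := by
  simp [pvAdjE, Prod.ext_iff]
  tauto

theorem pvGraph_spec (E : List (Int × Int)) :
    (∀ k, k ∈ (pvGraph E).keys ↔ pvNode E k) ∧
    (∀ a b, b ∈ (pvGraph E).getD a PySem.Set.empty ↔ pvAdjE E a b) ∧
    (pvGraph E).keys.Nodup := by
  induction E using List.reverseRecOn with
  | nil =>
      refine ⟨?_, ?_, ?_⟩
      · intro k; simp [pvGraph, pvNode, PySem.Dict.keys_empty]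
      · intro a b; simp [pvGraph, pvAdjE, PySem.Dict.getD_empty, PySem.Set.empty]
      · simp [pvGraph, PySem.Dict.keys_empty]
  | append_singleton l pc ih =>
      obtain ⟨ih1, ih2, ih3⟩ := ih
      have hstep : pvGraph (l ++ [pc]) =
          ((pvGraph l).modify pc.1 PySem.Set.empty (fun s => PySem.Set.add s pc.2)).modify
            pc.2 PySem.Set.empty (fun s => PySem.Set.add s pc.1) := by
        simp [pvGraph, List.foldl_append]
      obtain ⟨p, c⟩ := pc
      refine ⟨?_, ?_, ?_⟩
      · intro k
        rw [hstep, pvNode_append]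
        rw [← PySem.Dict.contains_iff_mem_keys, PySem.Dict.contains_modify]
        simp only [Bool.or_eq_true, beq_iff_eq, PySem.Dict.contains_modify,
          PySem.Dict.contains_iff_mem_keys]
        rw [ih1]
        tauto
      · intro a b
        rw [hstep, pvAdjE_append]
        by_cases hac : a = c
        · subst hac
          rw [PySem.Dict.getD_modify, if_pos rfl, PySem.Set.mem_add]
          by_cases hap : a = p
          · subst hap
            rw [PySem.Dict.getD_modify, if_pos rfl, PySem.Set.mem_add, ih2]
            tauto
          · rw [PySem.Dict.getD_modify, if_neg hap, ih2]
            tauto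
        · rw [PySem.Dict.getD_modify, if_neg hac, PySem.Dict.getD_modify]
          by_cases hap : a = p
          · subst hap
            rw [if_pos rfl, PySem.Set.mem_add, ih2]
            tauto
          · rw [if_neg hap, ih2]
            exact ⟨Or.inl, fun h => by
              rcases h with h | ⟨h, _⟩ | ⟨h, _⟩
              exacts [h, absurd h hap, absurd h hac]⟩
      · rw [hstep]
        rw [PySem.Dict.keys_modify]
        apply PySem.Dict.nodup_keys_insert
        rw [PySem.Dict.keys_modify]
        exact PySem.Dict.nodup_keys_insert _ _ _ ih3

-- ----- A side: the DFS loop -----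

theorem pvDfs_superset (g : PySem.Dict Int (PySem.Set Int)) (stack : List Int)
    (comp : PySem.Set Int) :
    (∀ y ∈ comp, y ∈ pvDfs g stack comp) ∧ (∀ y ∈ stack, y ∈ pvDfs g stack comp) := by
  fun_induction pvDfs g stack comp with
  | case1 comp => simp
  | case2 comp current rest hcur ih =>
      exact ⟨ih.1, fun y hy => by
        rcases List.mem_cons.mp hy with rfl | hy
        · exact ih.1 _ hcur
        · exact ih.2 _ hy⟩
  | case3 comp current rest hcur ih =>
      refine ⟨fun y hy => ih.1 _ ?_, fun y hy => ?_⟩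
      · simp [PySem.Set.mem_add, hy]
      · rcases List.mem_cons.mp hy with rfl | hy
        · exact ih.1 _ (by simp [PySem.Set.mem_add])
        · exact ih.2 _ (by simp [hy])

theorem pvDfs_closed (g : PySem.Dict Int (PySem.Set Int)) (stack : List Int)
    (comp : PySem.Set Int)
    (h : ∀ y ∈ comp, ∀ z ∈ g.getD y PySem.Set.empty, z ∈ comp ∨ z ∈ stack) :
    ∀ y ∈ pvDfs g stack comp, ∀ z ∈ g.getD y PySem.Set.empty, z ∈ pvDfs g stack comp := by
  fun_induction pvDfs g stack comp with
  | case1 comp => exact fun y hy z hz => (h y hy z hz).elim id (by simp)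
  | case2 comp current rest hcur ih =>
      refine ih (fun y hy z hz => ?_)
      rcases h y hy z hz with hz | hz
      · exact Or.inl hz
      · rcases List.mem_cons.mp hz with rfl | hz
        · exact Or.inl hcur
        · exact Or.inr hz
  | case3 comp current rest hcur ih =>
      refine ih (fun y hy z hz => ?_)
      rcases (PySem.Set.mem_add comp current y).mp hy with hy | rfl
      · rcases h y hy z hz with hz | hz
        · exact Or.inl ((PySem.Set.mem_add comp current z).mpr (Or.inl hz))
        · rcases List.mem_cons.mp hz with rfl | hz
          · exact Or.inl (by simp [PySem.Set.mem_add])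
          · exact Or.inr (by simp [hz])
      · exact Or.inr (List.mem_append_left _ hz)

theorem pvDfs_sound (g : PySem.Dict Int (PySem.Set Int)) (stack : List Int)
    (comp : PySem.Set Int) (W : Int → Prop)
    (hW : ∀ a b, W a → b ∈ g.getD a PySem.Set.empty → W b)
    (h1 : ∀ y ∈ comp, W y) (h2 : ∀ y ∈ stack, W y) :
    ∀ y ∈ pvDfs g stack comp, W y := by
  fun_induction pvDfs g stack comp with
  | case1 comp => exact h1
  | case2 comp current rest hcur ih =>
      exact ih h1 (fun y hy => h2 y (List.mem_cons_of_mem _ hy))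
  | case3 comp current rest hcur ih =>
      have hWc : W current := h2 current List.mem_cons_self
      refine ih (fun y hy => ?_) (fun y hy => ?_)
      · rcases (PySem.Set.mem_add comp current y).mp hy with hy | rfl
        · exact h1 y hy
        · exact hWc
      · rcases List.mem_append.mp hy with hy | hy
        · exact hW current y hWc hy
        · exact h2 y (List.mem_cons_of_mem _ hy)

theorem pvDfs_nodup (g : PySem.Dict Int (PySem.Set Int)) (stack : List Int)
    (comp : PySem.Set Int) (h : comp.Nodup) : (pvDfs g stack comp).Nodup := by
  fun_induction pvDfs g stack comp with
  | case1 comp => exact h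
  | case2 comp current rest hcur ih => exact ih h
  | case3 comp current rest hcur ih => exact ih (PySem.Set.nodup_add comp current h)

theorem pvDfs_mem_iff (g : PySem.Dict Int (PySem.Set Int)) (n y : Int) :
    y ∈ pvDfs g [n] PySem.Set.empty ↔
      Relation.ReflTransGen (fun a b => b ∈ g.getD a PySem.Set.empty) n y := by
  constructor
  · refine pvDfs_sound g [n] PySem.Set.empty _ (fun a b ha hb => ha.tail hb)
      (by simp [PySem.Set.empty])
      (fun z hz => by
        rcases List.mem_cons.mp hz with rfl | hz
        · exact Relation.ReflTransGen.refl
        · simp at hz) y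
  · intro h
    induction h with
    | refl => exact (pvDfs_superset g [n] PySem.Set.empty).2 n (by simp)
    | tail hab hbc ih =>
        exact pvDfs_closed g [n] PySem.Set.empty (by simp [PySem.Set.empty]) _ ih _ hbc

-- ----- A side: the outer loop -----

theorem pvChain_mem (g : PySem.Dict Int (PySem.Set Int)) (min_pts : Int) (nodes : List Int)
    (visited valid : PySem.Set Int)
    (hsym : ∀ a b, b ∈ g.getD a PySem.Set.empty → a ∈ g.getD b PySem.Set.empty)
    (hvis : ∀ y z, y ∈ visited →
      Relation.ReflTransGen (fun a b => b ∈ g.getD a PySem.Set.empty) y z → z ∈ visited)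
    (hval : ∀ y, y ∈ valid ↔ y ∈ visited ∧
      (∃ L : List Int, L.Nodup ∧
        (∀ z, z ∈ L ↔ Relation.ReflTransGen (fun a b => b ∈ g.getD a PySem.Set.empty) y z) ∧
        min_pts ≤ (L.length : Int))) :
    ∀ y, y ∈ pvChain g min_pts nodes visited valid ↔
      ((y ∈ visited ∨ ∃ n ∈ nodes,
          Relation.ReflTransGen (fun a b => b ∈ g.getD a PySem.Set.empty) n y) ∧
        (∃ L : List Int, L.Nodup ∧
          (∀ z, z ∈ L ↔ Relation.ReflTransGen (fun a b => b ∈ g.getD a PySem.Set.empty) y z) ∧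
          min_pts ≤ (L.length : Int))) := by
  induction nodes generalizing visited valid with
  | nil =>
      intro y
      simp only [pvChain, List.not_mem_nil, false_and, exists_false, or_false]
      rw [hval]
  | cons node rest ih =>
      intro y
      by_cases hnode : node ∈ visited
      · simp only [pvChain, if_pos hnode]
        rw [ih visited valid hvis hval]
        constructor
        · rintro ⟨h1, h2⟩
          exact ⟨h1.imp id (fun ⟨n, hn, hc⟩ => ⟨n, List.mem_cons_of_mem _ hn, hc⟩), h2⟩
        · rintro ⟨h1, h2⟩
          refine ⟨?_, h2⟩
          rcases h1 with h1 | ⟨n, hn, hc⟩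
          · exact Or.inl h1
          · rcases List.mem_cons.mp hn with rfl | hn
            · exact Or.inl (hvis n y hnode hc)
            · exact Or.inr ⟨n, hn, hc⟩
      · simp only [pvChain, if_neg hnode]
        set R := fun a b => b ∈ g.getD a PySem.Set.empty with hR
        have hRsymm : ∀ a b, Relation.ReflTransGen R a b → Relation.ReflTransGen R b a :=
          fun a b h => Relation.ReflTransGen.symmetric (fun u v huv => hsym u v huv) h
        set C := pvDfs g [node] PySem.Set.empty with hC
        have hCmem : ∀ z, z ∈ C ↔ Relation.ReflTransGen R node z :=
          fun z => pvDfs_mem_iff g node z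
        have hCnd : C.Nodup := pvDfs_nodup g [node] PySem.Set.empty (by simp [PySem.Set.empty])
        -- component sets agree for any member of C
        have hshift : ∀ x, x ∈ C → ∀ z,
            (Relation.ReflTransGen R x z ↔ Relation.ReflTransGen R node z) := by
          intro x hx z
          have hnx : Relation.ReflTransGen R node x := (hCmem x).mp hx
          exact ⟨fun h => hnx.trans h, fun h => (hRsymm _ _ hnx).trans h⟩
        have hdisj : ∀ x, x ∈ C → ¬ x ∈ visited := by
          intro x hx hxv
          exact hnode (hvis x node hxv (hRsymm _ _ ((hCmem x).mp hx)))
        have hvis' : ∀ y z, y ∈ visited.union C →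
            Relation.ReflTransGen R y z → z ∈ visited.union C := by
          intro a z ha hc
          rcases (PySem.Set.mem_union visited C a).mp ha with ha | ha
          · exact (PySem.Set.mem_union _ _ _).mpr (Or.inl (hvis a z ha hc))
          · exact (PySem.Set.mem_union _ _ _).mpr (Or.inr ((hCmem z).mpr
              (((hCmem a).mp ha).trans hc)))
        have hlen : PySem.Set.len C = (C.length : Int) := by simp [PySem.Set.len]
        have hval' : ∀ y, y ∈ (if min_pts ≤ PySem.Set.len C then valid.union C else valid) ↔
            y ∈ visited.union C ∧
            (∃ L : List Int, L.Nodup ∧ (∀ z, z ∈ L ↔ Relation.ReflTransGen R y z) ∧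
              min_pts ≤ (L.length : Int)) := by
          intro a
          by_cases hcond : min_pts ≤ PySem.Set.len C
          · rw [if_pos hcond]
            rw [PySem.Set.mem_union]
            constructor
            · rintro (ha | ha)
              · rcases (hval a).mp ha with ⟨h1, h2⟩
                exact ⟨(PySem.Set.mem_union _ _ _).mpr (Or.inl h1), h2⟩
              · refine ⟨(PySem.Set.mem_union _ _ _).mpr (Or.inr ha), C, hCnd, ?_, ?_⟩
                · intro z; rw [hCmem z]; exact (hshift a ha z).symm
                · rwa [hlen] at hcond
            · rintro ⟨h1, h2⟩
              rcases (PySem.Set.mem_union _ _ _).mp h1 with h1 | h1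
              · exact Or.inl ((hval a).mpr ⟨h1, h2⟩)
              · exact Or.inr h1
          · rw [if_neg hcond]
            rw [hval]
            constructor
            · rintro ⟨h1, h2⟩
              exact ⟨(PySem.Set.mem_union _ _ _).mpr (Or.inl h1), h2⟩
            · rintro ⟨h1, h2⟩
              rcases (PySem.Set.mem_union _ _ _).mp h1 with h1 | h1
              · exact ⟨h1, h2⟩
              · exfalso
                rcases h2 with ⟨L, hLnd, hLm, hLlen⟩
                have : L.length = C.length := pv_length_eq_of_same_mem hLnd hCnd
                  (fun z => (hLm z).trans (((hshift a h1 z)).trans (hCmem z).symm))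
                rw [hlen] at hcond
                rw [this] at hLlen
                exact hcond hLlen
        rw [ih _ _ hvis' hval']
        constructor
        · rintro ⟨h1, h2⟩
          refine ⟨?_, h2⟩
          rcases h1 with h1 | ⟨n, hn, hc⟩
          · rcases (PySem.Set.mem_union _ _ _).mp h1 with h1 | h1
            · exact Or.inl h1
            · exact Or.inr ⟨node, List.mem_cons_self, (hCmem y).mp h1⟩
          · exact Or.inr ⟨n, List.mem_cons_of_mem _ hn, hc⟩
        · rintro ⟨h1, h2⟩
          refine ⟨?_, h2⟩
          rcases h1 with h1 | ⟨n, hn, hc⟩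
          · exact Or.inl ((PySem.Set.mem_union _ _ _).mpr (Or.inl h1))
          · rcases List.mem_cons.mp hn with rfl | hn
            · exact Or.inl ((PySem.Set.mem_union _ _ _).mpr (Or.inr ((hCmem y).mpr hc)))
            · exact Or.inr ⟨n, hn, hc⟩

theorem pvValidA_iff (correlations : List (Int × Int)) (min_pts : Int) (y : Int) :
    y ∈ pvChain (pvGraph correlations) min_pts (pvGraph correlations).keys
        PySem.Set.empty PySem.Set.empty ↔
      pvNode correlations y ∧ pvSizeOK correlations min_pts y := by
  obtain ⟨hkeys, hadj, _⟩ := pvGraph_spec correlations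
  set g := pvGraph correlations with hg
  have hconn : ∀ x z, Relation.ReflTransGen (fun a b => b ∈ g.getD a PySem.Set.empty) x z ↔
      pvConn correlations x z :=
    fun x z => pv_rtg_congr (fun a b => hadj a b) x z
  have h := pvChain_mem g min_pts g.keys PySem.Set.empty PySem.Set.empty
    (fun a b hb => (hadj b a).mpr (pvAdjE_symm ((hadj a b).mp hb)))
    (fun a z ha => by simp [PySem.Set.empty] at ha)
    (fun a => by simp [PySem.Set.empty]) y
  rw [h]
  have hemp : ∀ z : Int, ¬ z ∈ (PySem.Set.empty : PySem.Set Int) := by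
    simp [PySem.Set.empty]
  constructor
  · rintro ⟨he | ⟨n, hn, hc⟩, L, hLnd, hLm, hLl⟩
    · exact absurd he (hemp y)
    · rw [hconn] at hc
      have hny : pvNode correlations y := by
        rcases pvConn_node_or_eq hc with rfl | h
        · exact (hkeys _).mp hn
        · exact h
      exact ⟨hny, L, hLnd, fun z => (hLm z).trans (hconn y z), hLl⟩
  · rintro ⟨hny, L, hLnd, hLm, hLl⟩
    exact ⟨Or.inr ⟨y, (hkeys y).mpr hny, (hconn y y).mpr Relation.ReflTransGen.refl⟩,
      L, hLnd, fun z => (hLm z).trans (hconn y z).symm, hLl⟩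

-- ----- B side -----

theorem pvFindPC_append (comps : List (List Int)) (a : List Int) (p c : Int) :
    pvFindPC (comps ++ [a]) p c =
      ((if p ∈ a then some comps.length else (pvFindPC comps p c).1),
       (if c ∈ a then some comps.length else (pvFindPC comps p c).2)) := by
  simp [pvFindPC, List.zipIdx_append, List.foldl_append]

theorem pvFindPC_swap (comps : List (List Int)) (p c : Int) :
    (pvFindPC comps p c).2 = (pvFindPC comps c p).1 := by
  induction comps using List.reverseRecOn with
  | nil => rfl
  | append_singleton l a ih => simp [pvFindPC_append, ih]

theorem pvFindPC_fst_none (comps : List (List Int)) (p c : Int) :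
    (pvFindPC comps p c).1 = none ↔ ∀ comp ∈ comps, ¬ p ∈ comp := by
  induction comps using List.reverseRecOn with
  | nil => simp [pvFindPC]
  | append_singleton l a ih =>
      rw [pvFindPC_append]
      by_cases hpa : p ∈ a
      · rw [if_pos hpa]
        simp
        exact ⟨a, Or.inr rfl, hpa⟩
      · rw [if_neg hpa, ih]
        constructor
        · intro h comp hc
          rcases List.mem_append.mp hc with hc | hc
          · exact h comp hc
          · simp only [List.mem_singleton] at hc
            subst hc
            exact hpa
        · intro h comp hc
          exact h comp (List.mem_append.mpr (Or.inl hc))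

theorem pvFindPC_fst_some (comps : List (List Int)) (p c : Int) (i : Nat)
    (h : (pvFindPC comps p c).1 = some i) : ∃ h' : i < comps.length, p ∈ comps[i] := by
  induction comps using List.reverseRecOn with
  | nil => simp [pvFindPC] at h
  | append_singleton l a ih =>
      rw [pvFindPC_append] at h
      by_cases hpa : p ∈ a
      · rw [if_pos hpa] at h
        cases h
        refine ⟨by simp, ?_⟩
        rw [List.getElem_append]
        simp [hpa]
      · rw [if_neg hpa] at h
        obtain ⟨h', hmem⟩ := ih h
        refine ⟨by simp; omega, ?_⟩
        rw [List.getElem_append]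
        simp [h', hmem]

theorem pvConn_append (E : List (Int × Int)) (p c x y : Int) :
    pvConn (E ++ [(p, c)]) x y ↔
      pvConn E x y ∨ (pvConn E x p ∧ pvConn E c y) ∨ (pvConn E x c ∧ pvConn E p y) := by
  have lift : ∀ u v, pvConn E u v → pvConn (E ++ [(p, c)]) u v := fun u v =>
    Relation.ReflTransGen.mono (fun a b hab =>
      hab.elim (fun h => Or.inl (List.mem_append_left _ h))
        (fun h => Or.inr (List.mem_append_left _ h)))
  have edge : pvAdjE (E ++ [(p, c)]) p c :=
    Or.inl (List.mem_append_right _ (by simp))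
  constructor
  · intro h
    induction h with
    | refl => exact Or.inl Relation.ReflTransGen.refl
    | tail hxb hby ih =>
        rename_i b y'
        rcases (pvAdjE_append E p c b y').mp hby with hE | ⟨hb, hy⟩ | ⟨hb, hy⟩
        · rcases ih with ih | ⟨ih1, ih2⟩ | ⟨ih1, ih2⟩
          · exact Or.inl (ih.tail hE)
          · exact Or.inr (Or.inl ⟨ih1, ih2.tail hE⟩)
          · exact Or.inr (Or.inr ⟨ih1, ih2.tail hE⟩)
        · rw [hb] at ih
          rw [hy]
          rcases ih with ih | ⟨ih1, ih2⟩ | ⟨ih1, ih2⟩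
          · exact Or.inr (Or.inl ⟨ih, Relation.ReflTransGen.refl⟩)
          · exact Or.inl (ih1.trans (pvConn_symm ih2))
          · exact Or.inl ih1
        · rw [hb] at ih
          rw [hy]
          rcases ih with ih | ⟨ih1, ih2⟩ | ⟨ih1, ih2⟩
          · exact Or.inr (Or.inr ⟨ih, Relation.ReflTransGen.refl⟩)
          · exact Or.inl ih1
          · exact Or.inl (ih1.trans (pvConn_symm ih2))
  · rintro (h | ⟨h1, h2⟩ | ⟨h1, h2⟩)
    · exact lift _ _ h
    · exact (lift _ _ h1).trans ((Relation.ReflTransGen.single edge).trans (lift _ _ h2))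
    · exact (lift _ _ h1).trans
        ((Relation.ReflTransGen.single (pvAdjE_symm edge)).trans (lift _ _ h2))

-- the invariant of B's merge loop: comps is the partition of the nodes of E into components
def pvInv (E : List (Int × Int)) (comps : List (List Int)) : Prop :=
  (∀ i (h : i < comps.length), comps[i].Nodup) ∧
  (∀ y, (∃ i, ∃ h : i < comps.length, y ∈ comps[i]) ↔ pvNode E y) ∧
  (∀ i (h : i < comps.length), ∀ x ∈ comps[i], ∀ y, (y ∈ comps[i] ↔ pvConn E x y)) ∧
  (∀ i j (hi : i < comps.length) (hj : j < comps.length), i ≠ j →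
    ∀ x ∈ comps[i], ¬ x ∈ comps[j])

theorem pvConn_to_of_not_node {E : List (Int × Int)} {x : Int} (hx : ¬ pvNode E x) (y : Int) :
    pvConn E y x ↔ y = x :=
  ⟨fun h => pvConn_eq_of_not_node hx (pvConn_symm h), fun h => h ▸ Relation.ReflTransGen.refl⟩

theorem pvConn_from_of_not_node {E : List (Int × Int)} {x : Int} (hx : ¬ pvNode E x) (y : Int) :
    pvConn E x y ↔ y = x :=
  ⟨fun h => pvConn_eq_of_not_node hx h, fun h => h ▸ Relation.ReflTransGen.refl⟩

theorem pvInv_congr {E₁ E₂ : List (Int × Int)} {comps : List (List Int)}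
    (hN : ∀ y, pvNode E₁ y ↔ pvNode E₂ y) (hC : ∀ x y, pvConn E₁ x y ↔ pvConn E₂ x y)
    (h : pvInv E₁ comps) : pvInv E₂ comps := by
  obtain ⟨hnd, hcov, hclass, hdisj⟩ := h
  exact ⟨hnd, fun y => (hcov y).trans (hN y),
    fun i hi x hx y => (hclass i hi x hx y).trans (hC x y), hdisj⟩

-- branches 2 and 3 of the merge: attach a fresh node a to the component of b
theorem pvMerge_extend (E : List (Int × Int)) (comps : List (List Int)) (h : pvInv E comps)
    (a b : Int) (j : Nat) (hj : j < comps.length) (hb : b ∈ comps[j])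
    (hfresh : ∀ comp ∈ comps, ¬ a ∈ comp) :
    pvInv (E ++ [(a, b)]) (comps.modify j (fun comp => comp ++ [a])) := by
  obtain ⟨hnd, hcov, hclass, hdisj⟩ := h
  have hfr : ∀ i (hi : i < comps.length), ¬ a ∈ comps[i] :=
    fun i hi => hfresh comps[i] (List.getElem_mem hi)
  have han : ¬ pvNode E a := by
    intro hnode
    obtain ⟨i, hi, hxi⟩ := (hcov a).mpr hnode
    exact hfr i hi hxi
  have hc' : ∀ x y, pvConn (E ++ [(a, b)]) x y ↔
      (pvConn E x y ∨ (x = a ∧ pvConn E b y) ∨ (pvConn E x b ∧ y = a)) := by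
    intro x y
    rw [pvConn_append, pvConn_to_of_not_node han, pvConn_from_of_not_node han]
  have hget : ∀ k (hk : k < (comps.modify j (fun comp => comp ++ [a])).length),
      (comps.modify j (fun comp => comp ++ [a]))[k] =
        if j = k then comps[k]'(by rw [List.length_modify] at hk; exact hk) ++ [a]
        else comps[k]'(by rw [List.length_modify] at hk; exact hk) :=
    fun k hk => List.getElem_modify _ _ _ _ hk
  refine ⟨?_, ?_, ?_, ?_⟩
  · intro k hk
    have hk' : k < comps.length := by rw [List.length_modify] at hk; exact hk
    rw [hget k hk]
    by_cases hjk : j = k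
    · rw [if_pos hjk]
      rw [List.nodup_append]
      refine ⟨hnd k hk', List.nodup_singleton a, ?_⟩
      intro x hx b hb he
      subst he
      exact hfr k hk' ((List.mem_singleton.mp hb) ▸ hx)
    · rw [if_neg hjk]
      exact hnd k hk'
  · intro y
    rw [pvNode_append]
    constructor
    · rintro ⟨k, hk, hyk⟩
      have hk' : k < comps.length := by rw [List.length_modify] at hk; exact hk
      rw [hget k hk] at hyk
      by_cases hjk : j = k
      · rw [if_pos hjk] at hyk
        rcases List.mem_append.mp hyk with hyk | hyk
        · exact Or.inl ((hcov y).mp ⟨k, hk', hyk⟩)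
        · exact Or.inr (Or.inl (List.mem_singleton.mp hyk))
      · rw [if_neg hjk] at hyk
        exact Or.inl ((hcov y).mp ⟨k, hk', hyk⟩)
    · have hmk : ∀ k (hk : k < comps.length), y ∈ comps[k] →
          ∃ k', ∃ hk' : k' < (comps.modify j (fun comp => comp ++ [a])).length,
            y ∈ (comps.modify j (fun comp => comp ++ [a]))[k'] := by
        intro k hk hyk
        refine ⟨k, by rw [List.length_modify]; exact hk, ?_⟩
        rw [hget k (by rw [List.length_modify]; exact hk)]
        by_cases hjk : j = k
        · rw [if_pos hjk]; exact List.mem_append_left _ hyk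
        · rw [if_neg hjk]; exact hyk
      rintro (hyn | rfl | rfl)
      · obtain ⟨k, hk, hyk⟩ := (hcov y).mpr hyn
        exact hmk k hk hyk
      · refine ⟨j, by rw [List.length_modify]; exact hj, ?_⟩
        rw [hget j (by rw [List.length_modify]; exact hj), if_pos rfl]
        exact List.mem_append_right _ (List.mem_singleton.mpr rfl)
      · exact hmk j hj hb
  · intro k hk x hx y
    have hk' : k < comps.length := by rw [List.length_modify] at hk; exact hk
    rw [hget k hk] at hx ⊢
    rw [hc']
    by_cases hjk : j = k
    · subst hjk
      rw [if_pos rfl] at hx ⊢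
      rcases List.mem_append.mp hx with hx | hx
      · have hxa : x ≠ a := fun he => hfr j hj (he ▸ hx)
        have hxb : pvConn E x b := (hclass j hj x hx b).mp hb
        constructor
        · intro hy
          rcases List.mem_append.mp hy with hy | hy
          · exact Or.inl ((hclass j hj x hx y).mp hy)
          · exact Or.inr (Or.inr ⟨hxb, List.mem_singleton.mp hy⟩)
        · rintro (hy | ⟨he, _⟩ | ⟨_, rfl⟩)
          · exact List.mem_append_left _ ((hclass j hj x hx y).mpr hy)
          · exact absurd he hxa
          · exact List.mem_append_right _ (List.mem_singleton.mpr rfl)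
      · have hxa : x = a := List.mem_singleton.mp hx
        rw [hxa]
        constructor
        · intro hy
          rcases List.mem_append.mp hy with hy | hy
          · exact Or.inr (Or.inl ⟨rfl, (hclass j hj b hb y).mp hy⟩)
          · rcases List.mem_singleton.mp hy with rfl
            exact Or.inl Relation.ReflTransGen.refl
        · rintro (hy | ⟨_, hy⟩ | ⟨hy, rfl⟩)
          · have hya : y = a := pvConn_eq_of_not_node han hy
            subst hya
            exact List.mem_append_right _ (List.mem_singleton.mpr rfl)
          · exact List.mem_append_left _ ((hclass j hj b hb y).mpr hy)
          · exact List.mem_append_right _ (List.mem_singleton.mpr rfl)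
    · rw [if_neg hjk] at hx ⊢
      have hxa : x ≠ a := fun he => hfr k hk' (he ▸ hx)
      constructor
      · intro hy
        exact Or.inl ((hclass k hk' x hx y).mp hy)
      · rintro (hy | ⟨he, _⟩ | ⟨hxb, rfl⟩)
        · exact (hclass k hk' x hx y).mpr hy
        · exact absurd he hxa
        · exact absurd ((hclass k hk' x hx b).mpr hxb)
            (hdisj j k hj hk' hjk b hb)
  · intro k1 k2 hk1 hk2 hne x hx1
    have hk1' : k1 < comps.length := by rw [List.length_modify] at hk1; exact hk1
    have hk2' : k2 < comps.length := by rw [List.length_modify] at hk2; exact hk2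
    rw [hget k1 hk1] at hx1
    rw [hget k2 hk2]
    by_cases hj1 : j = k1
    · rw [if_pos hj1] at hx1
      rw [if_neg (hj1 ▸ hne)]
      rcases List.mem_append.mp hx1 with hx1 | hx1
      · exact hdisj k1 k2 hk1' hk2' hne x hx1
      · rcases List.mem_singleton.mp hx1 with rfl
        exact hfr k2 hk2'
    · rw [if_neg hj1] at hx1
      by_cases hj2 : j = k2
      · rw [if_pos hj2]
        intro hx2
        rcases List.mem_append.mp hx2 with hx2 | hx2
        · exact hdisj k1 k2 hk1' hk2' hne x hx1 hx2
        · rcases List.mem_singleton.mp hx2 with rfl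
          exact hfr k1 hk1' hx1
      · rw [if_neg hj2]
        exact hdisj k1 k2 hk1' hk2' hne x hx1

theorem pvMerge_inv (E : List (Int × Int)) (comps : List (List Int)) (pc : Int × Int)
    (h : pvInv E comps) : pvInv (E ++ [pc]) (pvMerge comps pc) := by
  obtain ⟨hnd, hcov, hclass, hdisj⟩ := h
  obtain ⟨p, c⟩ := pc
  have hswap := pvFindPC_swap comps p c
  rcases hfind : pvFindPC comps p c with ⟨fp, fc⟩
  have h1 : (pvFindPC comps p c).1 = fp := by rw [hfind]
  have h2 : (pvFindPC comps c p).1 = fc := by rw [← hswap, hfind]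
  have hnotnode : ∀ x : Int, (∀ comp ∈ comps, ¬ x ∈ comp) → ¬ pvNode E x := by
    intro x hx hnode
    obtain ⟨i, hi, hxi⟩ := (hcov x).mpr hnode
    exact hx comps[i] (List.getElem_mem hi) hxi
  cases fp with
  | none =>
      have hfp : ∀ comp ∈ comps, ¬ p ∈ comp := (pvFindPC_fst_none comps p c).mp h1
      have hpn : ¬ pvNode E p := hnotnode p hfp
      cases fc with
      | none =>
          have hfc : ∀ comp ∈ comps, ¬ c ∈ comp := (pvFindPC_fst_none comps c p).mp h2
          have hcn : ¬ pvNode E c := hnotnode c hfc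
          have hM : pvMerge comps (p, c) = comps ++ [if p = c then [p] else [p, c]] := by
            unfold pvMerge; rw [hfind]
          rw [hM]
          set newc : List Int := if p = c then [p] else [p, c] with hnc
          have hncmem : ∀ y, y ∈ newc ↔ (y = p ∨ y = c) := by
            intro y
            rw [hnc]
            by_cases hpc : p = c
            · rw [if_pos hpc]
              subst hpc
              simp
            · rw [if_neg hpc]
              simp
          have hncnd : newc.Nodup := by
            rw [hnc]
            by_cases hpc : p = c
            · rw [if_pos hpc]; exact List.nodup_singleton p
            · rw [if_neg hpc]
              simp [hpc]
          have hc' : ∀ x y, pvConn (E ++ [(p, c)]) x y ↔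
              (pvConn E x y ∨ (x = p ∧ y = c) ∨ (x = c ∧ y = p)) := by
            intro x y
            rw [pvConn_append, pvConn_to_of_not_node hpn, pvConn_from_of_not_node hcn,
              pvConn_to_of_not_node hcn, pvConn_from_of_not_node hpn]
          have hlen : (comps ++ [newc]).length = comps.length + 1 := by
            rw [List.length_append, List.length_singleton]
          have hget : ∀ k (hkc : k < comps.length) (hk : k < (comps ++ [newc]).length),
              (comps ++ [newc])[k] = comps[k]'hkc := by
            intro k hkc hk
            rw [List.getElem_append, dif_pos hkc]
          have hgetl : ∀ hk : comps.length < (comps ++ [newc]).length,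
              (comps ++ [newc])[comps.length] = newc := by
            intro hk
            rw [List.getElem_append, dif_neg (by omega)]
            simp
          have hnode' : ∀ x (hx : ∃ k, ∃ hk : k < comps.length, x ∈ comps[k]),
              x ≠ p ∧ x ≠ c := by
            rintro x ⟨k, hk, hxk⟩
            constructor <;> rintro rfl
            · exact hfp comps[k] (List.getElem_mem hk) hxk
            · exact hfc comps[k] (List.getElem_mem hk) hxk
          refine ⟨?_, ?_, ?_, ?_⟩
          · intro k hk
            by_cases hkc : k < comps.length
            · rw [hget k hkc hk]
              exact hnd k hkc
            · have hke : k = comps.length := by rw [hlen] at hk; omega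
              subst hke
              rw [hgetl hk]
              exact hncnd
          · intro y
            rw [pvNode_append]
            constructor
            · rintro ⟨k, hk, hy⟩
              by_cases hkc : k < comps.length
              · rw [hget k hkc hk] at hy
                exact Or.inl ((hcov y).mp ⟨k, hkc, hy⟩)
              · have hke : k = comps.length := by rw [hlen] at hk; omega
                subst hke
                rw [hgetl hk] at hy
                rcases (hncmem y).mp hy with rfl | rfl
                · exact Or.inr (Or.inl rfl)
                · exact Or.inr (Or.inr rfl)
            · rintro (hy | rfl | rfl)
              · obtain ⟨k, hk, hyk⟩ := (hcov y).mpr hy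
                refine ⟨k, by omega, ?_⟩
                rw [hget k hk (by omega)]
                exact hyk
              · refine ⟨comps.length, by omega, ?_⟩
                rw [hgetl (by omega)]
                exact (hncmem y).mpr (Or.inl rfl)
              · refine ⟨comps.length, by omega, ?_⟩
                rw [hgetl (by omega)]
                exact (hncmem y).mpr (Or.inr rfl)
          · intro k hk x hx y
            rw [hc']
            by_cases hkc : k < comps.length
            · rw [hget k hkc hk] at hx ⊢
              obtain ⟨hxp, hxc⟩ := hnode' x ⟨k, hkc, hx⟩
              constructor
              · intro hy
                exact Or.inl ((hclass k hkc x hx y).mp hy)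
              · rintro (hy | ⟨he, _⟩ | ⟨he, _⟩)
                · exact (hclass k hkc x hx y).mpr hy
                · exact absurd he hxp
                · exact absurd he hxc
            · have hke : k = comps.length := by rw [hlen] at hk; omega
              subst hke
              rw [hgetl hk] at hx ⊢
              rw [hncmem]
              rcases (hncmem x).mp hx with rfl | rfl
              · rw [pvConn_from_of_not_node hpn]
                constructor
                · rintro (rfl | rfl)
                  · exact Or.inl rfl
                  · exact Or.inr (Or.inl ⟨rfl, rfl⟩)
                · rintro (rfl | ⟨_, rfl⟩ | ⟨he, rfl⟩)
                  · exact Or.inl rfl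
                  · exact Or.inr rfl
                  · exact Or.inl rfl
              · rw [pvConn_from_of_not_node hcn]
                constructor
                · rintro (rfl | rfl)
                  · exact Or.inr (Or.inr ⟨rfl, rfl⟩)
                  · exact Or.inl rfl
                · rintro (rfl | ⟨he, rfl⟩ | ⟨_, rfl⟩)
                  · exact Or.inr rfl
                  · exact Or.inr rfl
                  · exact Or.inl rfl
          · intro k1 k2 hk1 hk2 hne x hx1
            by_cases hkc1 : k1 < comps.length
            · rw [hget k1 hkc1 hk1] at hx1
              obtain ⟨hxp, hxc⟩ := hnode' x ⟨k1, hkc1, hx1⟩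
              by_cases hkc2 : k2 < comps.length
              · rw [hget k2 hkc2 hk2]
                exact hdisj k1 k2 hkc1 hkc2 hne x hx1
              · have hke : k2 = comps.length := by rw [hlen] at hk2; omega
                subst hke
                rw [hgetl hk2]
                intro hx2
                rcases (hncmem x).mp hx2 with rfl | rfl
                · exact hxp rfl
                · exact hxc rfl
            · have hke : k1 = comps.length := by rw [hlen] at hk1; omega
              subst hke
              rw [hgetl hk1] at hx1
              have hkc2 : k2 < comps.length := by rw [hlen] at hk2; omega
              rw [hget k2 hkc2 hk2]
              intro hx2
              obtain ⟨hxp, hxc⟩ := hnode' x ⟨k2, hkc2, hx2⟩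
              rcases (hncmem x).mp hx1 with rfl | rfl
              · exact hxp rfl
              · exact hxc rfl
      | some j =>
          obtain ⟨hj, hcj⟩ := pvFindPC_fst_some comps c p j h2
          have hM : pvMerge comps (p, c) = comps.modify j (fun comp => comp ++ [p]) := by
            unfold pvMerge; rw [hfind]
          rw [hM]
          exact pvMerge_extend E comps ⟨hnd, hcov, hclass, hdisj⟩ p c j hj hcj hfp
  | some i =>
      obtain ⟨hi, hpi⟩ := pvFindPC_fst_some comps p c i h1
      cases fc with
      | none =>
          have hfc : ∀ comp ∈ comps, ¬ c ∈ comp := (pvFindPC_fst_none comps c p).mp h2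
          have hM : pvMerge comps (p, c) = comps.modify i (fun comp => comp ++ [c]) := by
            unfold pvMerge; rw [hfind]
          rw [hM]
          have hbase := pvMerge_extend E comps ⟨hnd, hcov, hclass, hdisj⟩ c p i hi hpi hfc
          refine pvInv_congr ?_ ?_ hbase
          · intro y
            rw [pvNode_append, pvNode_append]
            tauto
          · intro x y
            refine pv_rtg_congr (fun u v => ?_) x y
            rw [pvAdjE_append, pvAdjE_append]
            tauto
      | some j =>
          obtain ⟨hj, hcj⟩ := pvFindPC_fst_some comps c p j h2
          by_cases hij : i = j
          · have hM : pvMerge comps (p, c) = comps := by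
              unfold pvMerge; rw [hfind]; simp [hij]
            rw [hM]
            subst hij
            -- p and c are already in the same component: nothing changes
            have hpc : pvConn E p c := (hclass i hi p hpi c).mp hcj
            refine pvInv_congr ?_ ?_ ⟨hnd, hcov, hclass, hdisj⟩
            · intro y
              rw [pvNode_append]
              constructor
              · exact Or.inl
              · rintro (h | rfl | rfl)
                · exact h
                · exact (hcov y).mp ⟨i, hi, hpi⟩
                · exact (hcov y).mp ⟨i, hi, hcj⟩
            · intro x y
              rw [pvConn_append]
              constructor
              · exact Or.inl
              · rintro (h | ⟨ha, hb⟩ | ⟨ha, hb⟩)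
                · exact h
                · exact (ha.trans hpc).trans hb
                · exact (ha.trans (pvConn_symm hpc)).trans hb
          · have hM : pvMerge comps (p, c) =
                (comps.modify (min i j) (fun comp => comp ++ comps.getD (max i j) [])).eraseIdx
                  (max i j) := by
              unfold pvMerge; rw [hfind]; simp [hij]
            rw [hM]
            have hlo : min i j < comps.length := lt_of_le_of_lt (min_le_left _ _) hi
            have hhi : max i j < comps.length := max_lt hi hj
            have hlomax : min i j < max i j := by omega
            have hgetD : comps.getD (max i j) [] = comps[max i j] :=
              List.getD_eq_getElem comps [] hhi
            set M : List Int := comps[min i j] ++ comps[max i j] with hMdef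
            have hMmem : ∀ y, y ∈ M ↔ y ∈ comps[i] ∨ y ∈ comps[j] := by
              intro y
              rw [hMdef, List.mem_append]
              rcases Nat.lt_or_ge i j with hlt | hge
              · have e1 : min i j = i := Nat.min_eq_left (Nat.le_of_lt hlt)
                have e2 : max i j = j := Nat.max_eq_right (Nat.le_of_lt hlt)
                simp only [e1, e2]
              · have e1 : min i j = j := Nat.min_eq_right hge
                have e2 : max i j = i := Nat.max_eq_left hge
                simp only [e1, e2]
                exact or_comm
            set comps' : List (List Int) :=
              (comps.modify (min i j) (fun comp => comp ++ comps.getD (max i j) [])).eraseIdx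
                (max i j) with hcdef
            have hlen' : comps'.length = comps.length - 1 := by
              rw [hcdef, List.length_eraseIdx, List.length_modify]
              simp [hhi]
            have hentry : ∀ k (hk : k < comps'.length),
                (k = min i j ∧ comps'[k] = M) ∨
                (∃ m, ∃ hm : m < comps.length, m ≠ i ∧ m ≠ j ∧ comps'[k] = comps[m] ∧
                  m = (if k < max i j then k else k + 1)) := by
              intro k hk
              have hk1 : k < comps.length - 1 := by rw [← hlen']; exact hk
              by_cases hkm : k < max i j
              · have hget1 : comps'[k] =
                    (comps.modify (min i j)
                      (fun comp => comp ++ comps.getD (max i j) []))[k]'(by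
                        rw [List.length_modify]; omega) := by
                  simp only [hcdef]
                  rw [List.getElem_eraseIdx, dif_pos hkm]
                rw [List.getElem_modify] at hget1
                by_cases hklo : min i j = k
                · left
                  refine ⟨hklo.symm, ?_⟩
                  rw [hget1, if_pos hklo, hgetD, hMdef]
                  have e : min i j = k := hklo
                  simp only [e]
                · right
                  rw [if_neg hklo] at hget1
                  have hkij : k ≠ i ∧ k ≠ j := by
                    constructor <;> rintro rfl <;> omega
                  exact ⟨k, by omega, hkij.1, hkij.2, hget1, by rw [if_pos hkm]⟩
              · have hget1 : comps'[k] =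
                    (comps.modify (min i j)
                      (fun comp => comp ++ comps.getD (max i j) []))[k + 1]'(by
                        rw [List.length_modify]; omega) := by
                  simp only [hcdef]
                  rw [List.getElem_eraseIdx, dif_neg (by omega)]
                rw [List.getElem_modify] at hget1
                have hne1 : ¬ min i j = k + 1 := by omega
                rw [if_neg hne1] at hget1
                right
                have hkij : k + 1 ≠ i ∧ k + 1 ≠ j := by
                  constructor <;> intro he <;> omega
                exact ⟨k + 1, by omega, hkij.1, hkij.2, hget1, by rw [if_neg hkm]⟩
            have hsurj : ∀ m (hm : m < comps.length), m ≠ max i j →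
                ∃ k, ∃ hk : k < comps'.length,
                  comps'[k] = (if min i j = m then M else comps[m]) := by
              intro m hm hmmax
              by_cases hmlt : m < max i j
              · refine ⟨m, by omega, ?_⟩
                have hg : (comps'[m]'(by omega)) =
                    (comps.modify (min i j)
                      (fun comp => comp ++ comps.getD (max i j) []))[m]'(by
                        rw [List.length_modify]; omega) := by
                  simp only [hcdef]
                  rw [List.getElem_eraseIdx, dif_pos hmlt]
                rw [hg, List.getElem_modify]
                by_cases hml : min i j = m
                · rw [if_pos hml, if_pos hml, hgetD, hMdef]
                  simp only [hml]
                · rw [if_neg hml, if_neg hml]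
              · have hmgt : max i j < m := by omega
                have hm1 : m - 1 + 1 = m := by omega
                refine ⟨m - 1, by omega, ?_⟩
                have hg : (comps'[m - 1]'(by omega)) =
                    (comps.modify (min i j)
                      (fun comp => comp ++ comps.getD (max i j) []))[m - 1 + 1]'(by
                        rw [List.length_modify]; omega) := by
                  simp only [hcdef]
                  rw [List.getElem_eraseIdx, dif_neg (by omega)]
                rw [hg, List.getElem_modify]
                have hml : ¬ min i j = m - 1 + 1 := by omega
                rw [if_neg hml]
                have hml2 : ¬ min i j = m := by omega
                rw [if_neg hml2]
                simp only [hm1]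
            have hc' : ∀ x y, pvConn (E ++ [(p, c)]) x y ↔
                (pvConn E x y ∨ (pvConn E x p ∧ pvConn E c y) ∨
                  (pvConn E x c ∧ pvConn E p y)) := fun x y => pvConn_append E p c x y
            have hMnd : M.Nodup := by
              rw [hMdef, List.nodup_append]
              refine ⟨hnd _ hlo, hnd _ hhi, ?_⟩
              intro x hx b hb he
              subst he
              exact hdisj (min i j) (max i j) hlo hhi (by omega) x hx hb
            have hMclass : ∀ x ∈ M, ∀ y, (y ∈ M ↔ pvConn (E ++ [(p, c)]) x y) := by
              intro x hx y
              rw [hMmem] at hx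
              rw [hMmem, hc']
              rcases hx with hx | hx
              · have hxp : pvConn E x p := (hclass i hi x hx p).mp hpi
                have hxc : ¬ pvConn E x c := fun hcon =>
                  hdisj i j hi hj hij c ((hclass i hi x hx c).mpr hcon) hcj
                constructor
                · rintro (hy | hy)
                  · exact Or.inl ((hclass i hi x hx y).mp hy)
                  · exact Or.inr (Or.inl ⟨hxp, (hclass j hj c hcj y).mp hy⟩)
                · rintro (hy | ⟨_, hy⟩ | ⟨hy, _⟩)
                  · exact Or.inl ((hclass i hi x hx y).mpr hy)
                  · exact Or.inr ((hclass j hj c hcj y).mpr hy)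
                  · exact absurd hy hxc
              · have hxc : pvConn E x c := (hclass j hj x hx c).mp hcj
                have hxp : ¬ pvConn E x p := fun hcon =>
                  hdisj j i hj hi (fun he => hij he.symm) p
                    ((hclass j hj x hx p).mpr hcon) hpi
                constructor
                · rintro (hy | hy)
                  · exact Or.inr (Or.inr ⟨hxc, (hclass i hi p hpi y).mp hy⟩)
                  · exact Or.inl ((hclass j hj x hx y).mp hy)
                · rintro (hy | ⟨hy, _⟩ | ⟨_, hy⟩)
                  · exact Or.inr ((hclass j hj x hx y).mpr hy)
                  · exact absurd hy hxp
                  · exact Or.inl ((hclass i hi p hpi y).mpr hy)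
            refine ⟨?_, ?_, ?_, ?_⟩
            · intro k hk
              rcases hentry k hk with ⟨_, hkM⟩ | ⟨m, hm, _, _, hkm, _⟩
              · rw [hkM]; exact hMnd
              · rw [hkm]; exact hnd m hm
            · intro y
              rw [pvNode_append]
              constructor
              · rintro ⟨k, hk, hy⟩
                rcases hentry k hk with ⟨_, hkM⟩ | ⟨m, hm, _, _, hkm, _⟩
                · rw [hkM, hMmem] at hy
                  rcases hy with hy | hy
                  · exact Or.inl ((hcov y).mp ⟨i, hi, hy⟩)
                  · exact Or.inl ((hcov y).mp ⟨j, hj, hy⟩)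
                · rw [hkm] at hy
                  exact Or.inl ((hcov y).mp ⟨m, hm, hy⟩)
              · have hput : ∀ m (hm : m < comps.length), y ∈ comps[m] →
                    ∃ k, ∃ hk : k < comps'.length, y ∈ comps'[k] := by
                  intro m hm hym
                  by_cases hmi : m = i ∨ m = j
                  · obtain ⟨k, hk, hkM⟩ := hsurj (min i j) hlo (by omega)
                    rw [if_pos rfl] at hkM
                    refine ⟨k, hk, ?_⟩
                    rw [hkM, hMmem]
                    rcases hmi with rfl | rfl
                    · exact Or.inl hym
                    · exact Or.inr hym
                  · have hmi1 : m ≠ i := fun he => hmi (Or.inl he)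
                    have hmi2 : m ≠ j := fun he => hmi (Or.inr he)
                    have hmmax : m ≠ max i j := by
                      rcases max_choice i j with hmx | hmx <;> rw [hmx] <;>
                        [exact hmi1; exact hmi2]
                    obtain ⟨k, hk, hkm⟩ := hsurj m hm hmmax
                    have hmlo : ¬ min i j = m := by
                      rcases min_choice i j with hmn | hmn <;> rw [hmn] <;>
                        [exact fun he => hmi1 he.symm; exact fun he => hmi2 he.symm]
                    rw [if_neg hmlo] at hkm
                    exact ⟨k, hk, by rw [hkm]; exact hym⟩
                rintro (hy | rfl | rfl)
                · obtain ⟨m, hm, hym⟩ := (hcov y).mpr hy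
                  exact hput m hm hym
                · exact hput i hi hpi
                · exact hput j hj hcj
            · intro k hk x hx y
              rcases hentry k hk with ⟨_, hkM⟩ | ⟨m, hm, hmi, hmj, hkm, _⟩
              · rw [hkM] at hx ⊢
                exact hMclass x hx y
              · rw [hkm] at hx ⊢
                have hxp : ¬ pvConn E x p := fun hcon =>
                  hdisj m i hm hi hmi p ((hclass m hm x hx p).mpr hcon) hpi
                have hxc : ¬ pvConn E x c := fun hcon =>
                  hdisj m j hm hj hmj c ((hclass m hm x hx c).mpr hcon) hcj
                rw [hc']
                constructor
                · intro hy
                  exact Or.inl ((hclass m hm x hx y).mp hy)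
                · rintro (hy | ⟨hy, _⟩ | ⟨hy, _⟩)
                  · exact (hclass m hm x hx y).mpr hy
                  · exact absurd hy hxp
                  · exact absurd hy hxc
            · intro k1 k2 hk1 hk2 hne x hx1 hx2
              rcases hentry k1 hk1 with ⟨hk1lo, hk1M⟩ | ⟨m1, hm1, hm1i, hm1j, hk1m, hf1⟩ <;>
                rcases hentry k2 hk2 with ⟨hk2lo, hk2M⟩ | ⟨m2, hm2, hm2i, hm2j, hk2m, hf2⟩
              · exact hne (hk1lo.trans hk2lo.symm)
              · rw [hk1M, hMmem] at hx1
                rw [hk2m] at hx2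
                rcases hx1 with hx1 | hx1
                · exact hdisj i m2 hi hm2 (fun he => hm2i he.symm) x hx1 hx2
                · exact hdisj j m2 hj hm2 (fun he => hm2j he.symm) x hx1 hx2
              · rw [hk2M, hMmem] at hx2
                rw [hk1m] at hx1
                rcases hx2 with hx2 | hx2
                · exact hdisj m1 i hm1 hi hm1i x hx1 hx2
                · exact hdisj m1 j hm1 hj hm1j x hx1 hx2
              · rw [hk1m] at hx1
                rw [hk2m] at hx2
                have hmm : m1 ≠ m2 := by
                  by_cases b1 : k1 < max i j
                  · rw [if_pos b1] at hf1
                    by_cases b2 : k2 < max i j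
                    · rw [if_pos b2] at hf2; omega
                    · rw [if_neg b2] at hf2; omega
                  · rw [if_neg b1] at hf1
                    by_cases b2 : k2 < max i j
                    · rw [if_pos b2] at hf2; omega
                    · rw [if_neg b2] at hf2; omega
                exact hdisj m1 m2 hm1 hm2 hmm x hx1 hx2

theorem pvInv_foldl (correlations : List (Int × Int)) :
    pvInv correlations (correlations.foldl pvMerge []) := by
  induction correlations using List.reverseRecOn with
  | nil =>
      refine ⟨?_, ?_, ?_, ?_⟩
      · intro i h; simp at h
      · intro y
        simp only [List.foldl_nil]
        constructor
        · rintro ⟨i, h, _⟩; simp at h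
        · rintro ⟨pc, hpc, _⟩; simp at hpc
      · intro i h; simp at h
      · intro i j hi _; simp at hi
  | append_singleton l pc ih =>
      rw [List.foldl_append]
      exact pvMerge_inv l (l.foldl pvMerge []) pc ih

theorem pvValidB_foldl_mem (min_pts : Int) (comps : List (List Int)) (v : PySem.Set Int) (y : Int) :
    y ∈ comps.foldl
        (fun v comp => if min_pts ≤ (comp.length : Int) then PySem.Set.update v comp else v) v ↔
      y ∈ v ∨ ∃ comp ∈ comps, min_pts ≤ (comp.length : Int) ∧ y ∈ comp := by
  induction comps generalizing v with
  | nil => simp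
  | cons comp rest ih =>
      rw [List.foldl_cons, ih]
      by_cases hc : min_pts ≤ (comp.length : Int)
      · rw [if_pos hc]
        constructor
        · rintro (hv | h)
          · rcases (PySem.Set.mem_update v comp y).mp hv with hv | hv
            · exact Or.inl hv
            · exact Or.inr ⟨comp, List.mem_cons_self, hc, hv⟩
          · rcases h with ⟨d, hd, h1, h2⟩
            exact Or.inr ⟨d, List.mem_cons_of_mem _ hd, h1, h2⟩
        · rintro (hv | ⟨d, hd, h1, h2⟩)
          · exact Or.inl ((PySem.Set.mem_update v comp y).mpr (Or.inl hv))
          · rcases List.mem_cons.mp hd with rfl | hd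
            · exact Or.inl ((PySem.Set.mem_update v d y).mpr (Or.inr h2))
            · exact Or.inr ⟨d, hd, h1, h2⟩
      · rw [if_neg hc]
        constructor
        · rintro (hv | ⟨d, hd, h1, h2⟩)
          · exact Or.inl hv
          · exact Or.inr ⟨d, List.mem_cons_of_mem _ hd, h1, h2⟩
        · rintro (hv | ⟨d, hd, h1, h2⟩)
          · exact Or.inl hv
          · rcases List.mem_cons.mp hd with rfl | hd
            · exact absurd h1 hc
            · exact Or.inr ⟨d, hd, h1, h2⟩

theorem pvValidB_iff (correlations : List (Int × Int)) (min_pts : Int) (y : Int) :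
    y ∈ (correlations.foldl pvMerge []).foldl
        (fun v comp => if min_pts ≤ (comp.length : Int) then PySem.Set.update v comp else v)
        PySem.Set.empty ↔
      pvNode correlations y ∧ pvSizeOK correlations min_pts y := by
  obtain ⟨hnd, hcov, hclass, hdisj⟩ := pvInv_foldl correlations
  set comps := correlations.foldl pvMerge [] with hcomps
  rw [pvValidB_foldl_mem]
  have hemp : ∀ z : Int, ¬ z ∈ (PySem.Set.empty : PySem.Set Int) := by
    simp [PySem.Set.empty]
  constructor
  · rintro (hv | ⟨comp, hcm, hlen, hycomp⟩)
    · exact absurd hv (hemp y)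
    · obtain ⟨i, hi, rfl⟩ := List.mem_iff_getElem.mp hcm
      refine ⟨(hcov y).mp ⟨i, hi, hycomp⟩, comps[i], hnd i hi, ?_, hlen⟩
      intro z
      exact hclass i hi y hycomp z
  · rintro ⟨hnode, L, hLnd, hLm, hLl⟩
    obtain ⟨i, hi, hyi⟩ := (hcov y).mpr hnode
    refine Or.inr ⟨comps[i], List.getElem_mem hi, ?_, hyi⟩
    have hlen : L.length = comps[i].length :=
      pv_length_eq_of_same_mem hLnd (hnd i hi)
        (fun z => (hLm z).trans (hclass i hi y hyi z).symm)
    rwa [hlen] at hLl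

-- ===== VERDICT (by name: the statement is the Claim_ definition above) =====
theorem filter_correlations_by_chain_size_spec : Claim_equal_filter_correlations_by_chain_size := by
  unfold Claim_equal_filter_correlations_by_chain_size
  intro correlations min_pts filter_point_to_self _
  unfold Spec_filter_correlations_by_chain_size
  unfold filter_correlations_by_chain_size filter_correlations_by_chain_size_alt
  apply List.filter_congr
  intro pc _
  have h1 := fun z => (pvValidA_iff correlations min_pts z).trans
    (pvValidB_iff correlations min_pts z).symm
  rw [decide_eq_decide.mpr (h1 pc.1), decide_eq_decide.mpr (h1 pc.2)]
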